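-- pv_equiv track=rewrite | github.com/HimanshuMohanty-Git24/DSA-Pratice | Python/Basics/sol.py | findGroupID
-- ===== SOURCE A (Python) =====
-- def findGroupID(listPFR):
--     n = len(listPFR)
--     score = [0] * n
--     stack = []
--
--     for i in range(n):
--         while stack and listPFR[i] > listPFR[stack[-1]]:
--             top = stack.pop()
--             if stack and listPFR[stack[-1]] > listPFR[top]:
--                 score[top] = 5
--             else:
--                 score[top] = 10
--
--         if stack and listPFR[stack[-1]] > listPFR[i]:
--             score[i] = 5
--         else:
--             score[i] = 15
--
--         stack.append(i)
--
--     while stack: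
--         top = stack.pop()
--         if stack and listPFR[stack[-1]] > listPFR[top]:
--             score[top] = 5
--         else:
--             score[top] = 10
--
--     return sum(score)
-- ===== SOURCE B (Python) =====
-- def findGroupID(listPFR):
--     total = 0
--     for i in range(len(listPFR)):
--         pts = 10
--         for j in range(i - 1, -1, -1):
--             if listPFR[j] >= listPFR[i]:
--                 pts = 5 if listPFR[j] > listPFR[i] else 10
--                 break
--         total += pts
--     return total
-- ===== Notes on version B (the rewrite author's own statement) =====
-- stated objective: simpler
-- what changed: Replaced the monotonic stack with score array and dead push-time branches by a direct per-index backward scan to the nearest previous element >= current (strictly greater gives 5, equal or none gives 10), summed in one accumulator.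
import Mathlib
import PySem

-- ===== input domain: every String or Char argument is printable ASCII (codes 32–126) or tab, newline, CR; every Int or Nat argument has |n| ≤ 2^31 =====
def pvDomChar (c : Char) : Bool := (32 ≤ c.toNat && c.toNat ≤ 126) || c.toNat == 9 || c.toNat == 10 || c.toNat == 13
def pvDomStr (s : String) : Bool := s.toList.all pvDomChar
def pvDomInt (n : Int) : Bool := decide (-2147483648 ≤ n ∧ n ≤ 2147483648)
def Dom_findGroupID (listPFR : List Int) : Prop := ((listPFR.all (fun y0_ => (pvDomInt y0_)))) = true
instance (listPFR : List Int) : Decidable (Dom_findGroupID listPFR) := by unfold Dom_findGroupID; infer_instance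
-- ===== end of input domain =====

-- B replaces A's monotonic stack (score array, pops, final drain) by a direct per-index backward
-- scan to the nearest previous element ≥ the current one; return values are proved equal.

-- ===== PORT A =====
-- stack is kept top-first (head = Python's stack[-1])
-- score written when `top` is popped with `rest` remaining (shared by the pop loop and the drain)
def pvWV (l : List Int) (top : Nat) (rest : List Nat) : Int :=
  match rest with
  | [] => 10
  | b :: _ => if l.getD b 0 > l.getD top 0 then 5 else 10

def pvPop (l : List Int) (w : Int) : List Nat → List Int → List Nat × List Int
  | [], sc => ([], sc)
  | top :: rest, sc =>
    if w > l.getD top 0 then pvPop l w rest (sc.set top (pvWV l top rest))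
    else (top :: rest, sc)

-- push-time score for index i ("if stack and listPFR[stack[-1]] > listPFR[i]: 5 else 15")
def pvPts (l : List Int) (i : Nat) (st : List Nat) : Int :=
  match st with
  | [] => 15
  | b :: _ => if l.getD b 0 > l.getD i 0 then 5 else 15

def pvStep (l : List Int) (s : List Nat × List Int) (i : Nat) : List Nat × List Int :=
  let p := pvPop l (l.getD i 0) s.1 s.2
  (i :: p.1, p.2.set i (pvPts l i p.1))

def pvDrain (l : List Int) : List Nat → List Int → List Int
  | [], sc => sc
  | top :: rest, sc => pvDrain l rest (sc.set top (pvWV l top rest))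

def findGroupID (listPFR : List Int) : Int :=
  let n := listPFR.length
  let res := (List.range n).foldl (pvStep listPFR) ([], List.replicate n 0)
  (pvDrain listPFR res.1 res.2).sum

-- ===== PORT B =====
-- inner "for j in range(i-1,-1,-1)" scan of Source B (indices supplied highest first)
def pvScan (l : List Int) (w : Int) : List Nat → Int
  | [] => 10
  | j :: rest =>
    if l.getD j 0 ≥ w then (if l.getD j 0 > w then 5 else 10)
    else pvScan l w rest

def findGroupID_alt (listPFR : List Int) : Int :=
  (List.range listPFR.length).foldl
    (fun acc i => acc + pvScan listPFR (listPFR.getD i 0) (List.range i).reverse) 0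

-- ===== PRECONDITION & SPEC =====
def Spec_findGroupID (listPFR : List Int) (out : Int) : Prop := out = findGroupID_alt listPFR
instance (listPFR : List Int) (out : Int) : Decidable (Spec_findGroupID listPFR out) := by unfold Spec_findGroupID; infer_instance

-- ===== CLAIM (what is proved, stated in full; the proofs are below) =====
def Claim_equal_findGroupID : Prop := ∀ (listPFR : List Int), Dom_findGroupID listPFR → Spec_findGroupID listPFR (findGroupID listPFR)

-- ===== LEMMAS AND PROOFS =====
-- pvB l i is B's score for index i; the invariant PVInv states that A's stack is the chain of
-- nearest-previous-≥ indices and that every already-popped index carries score pvB.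
lemma pv_range_reverse_succ (i : Nat) : (List.range (i+1)).reverse = i :: (List.range i).reverse := by
  simp [List.range_succ]

lemma pv_scan_none (l : List Int) (w : Int) (i : Nat) (h : ∀ j < i, l.getD j 0 < w) :
    pvScan l w (List.range i).reverse = 10 := by
  induction i with
  | zero => simp [pvScan]
  | succ i ih =>
    rw [pv_range_reverse_succ]
    simp only [pvScan]
    have hi := h i (by omega)
    rw [if_neg (by omega)]
    exact ih (fun j hj => h j (by omega))

lemma pv_scan_hit (l : List Int) (w : Int) (c i : Nat) (hci : c < i) (hc : l.getD c 0 ≥ w)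
    (hmid : ∀ j, c < j → j < i → l.getD j 0 < w) :
    pvScan l w (List.range i).reverse = if l.getD c 0 > w then 5 else 10 := by
  induction i with
  | zero => omega
  | succ i ih =>
    rw [pv_range_reverse_succ]
    simp only [pvScan]
    by_cases h : i = c
    · subst h; rw [if_pos hc]
    · have hlt := hmid i (by omega) (by omega)
      rw [if_neg (by omega)]
      exact ih (by omega) (fun j hj hj2 => hmid j hj (by omega))

lemma pv_getD_set_self (sc : List Int) (i : Nat) (x : Int) (h : i < sc.length) :
    (sc.set i x).getD i 0 = x := by
  simp [List.getD_eq_getElem?_getD, h]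

lemma pv_getD_set_ne (sc : List Int) (i j : Nat) (x : Int) (h : i ≠ j) :
    (sc.set i x).getD j 0 = sc.getD j 0 := by
  simp [List.getD_eq_getElem?_getD, List.getElem?_set_ne h]

def pvB (l : List Int) (i : Nat) : Int := pvScan l (l.getD i 0) (List.range i).reverse

lemma pv_wv_eq (l : List Int) (top : Nat) (rest : List Nat)
    (hlink : ∀ b ∈ rest.head?, b < top ∧ l.getD top 0 ≤ l.getD b 0 ∧
      ∀ j, b < j → j < top → l.getD j 0 < l.getD top 0)
    (hbot : rest = [] → ∀ j < top, l.getD j 0 < l.getD top 0) :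
    pvWV l top rest = pvB l top := by
  cases rest with
  | nil => exact (pv_scan_none l _ top (hbot rfl)).symm
  | cons b t =>
    obtain ⟨hb, hge, hmid⟩ := hlink b rfl
    exact (pv_scan_hit l _ b top hb hge hmid).symm

lemma pv_pop_spec (l : List Int) (w : Int) :
    ∀ (st : List Nat) (sc : List Int),
    st.Pairwise (· > ·) →
    List.IsChain (fun a b => l.getD a 0 ≤ l.getD b 0 ∧
      ∀ j, b < j → j < a → l.getD j 0 < l.getD a 0) st →
    (∀ c ∈ st.getLast?, ∀ j < c, l.getD j 0 < l.getD c 0) →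
    sc.length = l.length →
    (∀ a ∈ st, a < l.length) →
    ∃ ps, st = ps ++ (pvPop l w st sc).1 ∧
      (∀ p ∈ ps, l.getD p 0 < w) ∧
      (pvPop l w st sc).2.length = sc.length ∧
      (∀ j, j ∉ ps → (pvPop l w st sc).2.getD j 0 = sc.getD j 0) ∧
      (∀ p ∈ ps, (pvPop l w st sc).2.getD p 0 = pvB l p) ∧
      (∀ b ∈ (pvPop l w st sc).1.head?, ¬ w > l.getD b 0) := by
  intro st
  induction st with
  | nil =>
    intro sc _ _ _ _ _
    exact ⟨[], by simp [pvPop]⟩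
  | cons top rest ih =>
    intro sc pw link bot len bound
    by_cases hw : w > l.getD top 0
    · have hb' : ∀ b ∈ rest.head?, b < top ∧ l.getD top 0 ≤ l.getD b 0 ∧
          ∀ j, b < j → j < top → l.getD j 0 < l.getD top 0 := by
        intro b hb
        have hmem := List.mem_of_mem_head? hb
        have hlnk := (List.isChain_cons.mp link).1 b hb
        exact ⟨List.rel_of_pairwise_cons pw hmem, hlnk.1, hlnk.2⟩
      have htopnr : top ∉ rest := by
        intro hm
        exact absurd (List.rel_of_pairwise_cons pw hm) (lt_irrefl top)
      have hx := pv_wv_eq l top rest hb'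
        (by intro hr j hj; subst hr; exact bot top (by simp) j hj)
      have hbot' : ∀ c ∈ rest.getLast?, ∀ j < c, l.getD j 0 < l.getD c 0 := by
        cases rest with
        | nil => simp
        | cons r t =>
          intro c hc
          exact bot c (by rw [List.getLast?_cons_cons]; exact hc)
      have hlen' : (sc.set top (pvWV l top rest)).length = l.length := by simpa using len
      obtain ⟨ps, h1, h2, h3, h4, h5, h6⟩ :=
        ih (sc.set top (pvWV l top rest)) (List.pairwise_cons.mp pw).2
          (List.isChain_cons.mp link).2 hbot' hlen'
          (fun a ha => bound a (List.mem_cons_of_mem _ ha))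
      have hps_sub : ∀ p ∈ ps, p ∈ rest := by
        intro p hp; rw [h1]; exact List.mem_append_left _ hp
      simp only [pvPop, if_pos hw]
      refine ⟨top :: ps, ?_, ?_, ?_, ?_, ?_, h6⟩
      · simpa using h1
      · intro p hp
        rcases List.mem_cons.mp hp with h | h
        · subst h; omega
        · exact h2 p h
      · rw [h3]; simp
      · intro j hj
        have hjt : j ≠ top := by
          intro h; exact hj (by simp [h])
        have hjp : j ∉ ps := fun h => hj (List.mem_cons_of_mem _ h)
        rw [h4 j hjp, pv_getD_set_ne _ _ _ _ (Ne.symm hjt)]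
      · intro p hp
        rcases List.mem_cons.mp hp with h | h
        · have htopps : top ∉ ps := fun hq => htopnr (hps_sub _ hq)
          subst h
          rw [h4 p htopps,
            pv_getD_set_self _ _ _ (by rw [len]; exact bound p List.mem_cons_self)]
          exact hx
        · exact h5 p h
    · refine ⟨[], ?_⟩
      simp only [pvPop, if_neg hw]
      refine ⟨by simp, by simp, by simp, by simp, by simp, ?_⟩
      intro b hb
      simp only [List.head?_cons, Option.mem_def, Option.some.injEq] at hb
      subst hb
      exact hw

structure PVInv (l : List Int) (k : Nat) (st : List Nat) (sc : List Int) : Prop where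
  head : st.head? = if k = 0 then none else some (k - 1)
  bound : ∀ a ∈ st, a < k
  pw : st.Pairwise (· > ·)
  link : List.IsChain (fun a b => l.getD a 0 ≤ l.getD b 0 ∧
    ∀ j, b < j → j < a → l.getD j 0 < l.getD a 0) st
  bot : ∀ c ∈ st.getLast?, ∀ j < c, l.getD j 0 < l.getD c 0
  cover : ∀ j, j < k → ∃ a ∈ st, j ≤ a ∧ (j = a ∨ l.getD j 0 < l.getD a 0)
  len : sc.length = l.length
  scores : ∀ j, j < k → j ∉ st → sc.getD j 0 = pvB l j

lemma pv_step_inv (l : List Int) (k : Nat) (s : List Nat × List Int)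
    (hk : k < l.length) (inv : PVInv l k s.1 s.2) :
    PVInv l (k+1) (pvStep l s k).1 (pvStep l s k).2 := by
  obtain ⟨st, sc⟩ := s
  obtain ⟨head, bound, pw, link, bot, cover, len, scores⟩ := inv
  dsimp only at head bound pw link bot cover len scores
  obtain ⟨ps, h1, h2, h3, h4, h5, h6⟩ :=
    pv_pop_spec l (l.getD k 0) st sc pw link bot len (fun a ha => lt_trans (bound a ha) hk)
  rcases hq : pvPop l (l.getD k 0) st sc with ⟨st1, sc1⟩
  rw [hq] at h1 h3 h4 h5 h6
  dsimp only at h1 h3 h4 h5 h6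
  have hstep : pvStep l (st, sc) k = (k :: st1, sc1.set k (pvPts l k st1)) := by
    simp only [pvStep, hq]
  rw [hstep]
  have pw1 : st1.Pairwise (· > ·) := (List.pairwise_append.mp (h1 ▸ pw)).2.1
  have link1 : List.IsChain (fun a b => l.getD a 0 ≤ l.getD b 0 ∧
      ∀ j, b < j → j < a → l.getD j 0 < l.getD a 0) st1 :=
    (List.isChain_append.mp (h1 ▸ link)).2.1
  have bound1 : ∀ a ∈ st1, a < k := fun a ha => bound a (h1 ▸ List.mem_append_right _ ha)
  have hmidnew : ∀ j, j < k → (∀ b ∈ st1.head?, b < j) → l.getD j 0 < l.getD k 0 := by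
    intro j hj hb
    obtain ⟨a, ha, hja, hcond⟩ := cover j hj
    have haps : a ∈ ps := by
      rcases List.mem_append.mp (h1 ▸ ha) with h | h
      · exact h
      · exfalso
        cases hst1e : st1 with
        | nil => rw [hst1e] at h; simp at h
        | cons b t =>
          have hbj : b < j := hb b (by rw [hst1e]; rfl)
          have hab : a ≤ b := by
            rw [hst1e] at h pw1
            rcases List.mem_cons.mp h with h' | h'
            · omega
            · exact le_of_lt (List.rel_of_pairwise_cons pw1 h')
          omega
    have hva := h2 a haps
    rcases hcond with h | h
    · subst h; omega
    · omega
  constructor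
  · simp
  · intro a ha
    rcases List.mem_cons.mp ha with h | h
    · omega
    · exact Nat.lt_succ_of_lt (bound1 a h)
  · exact List.pairwise_cons.mpr ⟨fun a ha => bound1 a ha, pw1⟩
  · refine List.isChain_cons.mpr ⟨?_, link1⟩
    intro b hb
    refine ⟨le_of_not_gt (h6 b hb), ?_⟩
    intro j hbj hjk
    exact hmidnew j hjk (fun b' hb' => by rw [hb'] at hb; simp at hb; omega)
  · cases hst1e : st1 with
    | nil =>
      subst hst1e
      intro c hc j hj
      simp only [List.getLast?_singleton, Option.mem_def, Option.some.injEq] at hc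
      subst hc
      exact hmidnew j hj (by simp)
    | cons b t =>
      subst hst1e
      intro c hc j hj
      refine bot c ?_ j hj
      rw [h1, List.getLast?_append_of_ne_nil _ (by simp)]
      rw [List.getLast?_cons_cons] at hc
      exact hc
  · intro j hj
    by_cases hjk : j = k
    · exact ⟨k, by simp, by omega, Or.inl hjk⟩
    · have hjk' : j < k := by omega
      obtain ⟨a, ha, hja, hcond⟩ := cover j hjk'
      rcases List.mem_append.mp (h1 ▸ ha) with h | h
      · refine ⟨k, by simp, by omega, Or.inr ?_⟩
        have hva := h2 a h
        rcases hcond with h' | h'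
        · subst h'; omega
        · omega
      · exact ⟨a, by simp [List.mem_cons]; right; exact h, hja, hcond⟩
  · simpa [h3] using len
  · intro j hj hjm
    have hjk : j ≠ k := by
      intro h; exact hjm (by simp [h])
    have hjst1 : j ∉ st1 := by
      intro h; exact hjm (by simp [List.mem_cons]; right; exact h)
    have hjlt : j < k := by omega
    rw [pv_getD_set_ne _ _ _ _ (Ne.symm hjk)]
    by_cases hjp : j ∈ ps
    · exact h5 j hjp
    · have hjst : j ∉ st := by
        rw [h1]; intro h
        rcases List.mem_append.mp h with h' | h'
        · exact hjp h'
        · exact hjst1 h'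
      rw [h4 j hjp]
      exact scores j hjlt hjst

lemma pv_fold_inv (l : List Int) : ∀ k, k ≤ l.length →
    PVInv l k ((List.range k).foldl (pvStep l) ([], List.replicate l.length 0)).1
              ((List.range k).foldl (pvStep l) ([], List.replicate l.length 0)).2 := by
  intro k
  induction k with
  | zero =>
    intro _
    refine ⟨by simp, by simp, by simp, by simp, by simp, by simp, by simp, by simp⟩
  | succ k ih =>
    intro hk
    rw [List.range_succ, List.foldl_append]
    exact pv_step_inv l k _ (by omega) (ih (by omega))

lemma pv_drain_spec (l : List Int) :
    ∀ (st : List Nat) (sc : List Int),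
    st.Pairwise (· > ·) →
    List.IsChain (fun a b => l.getD a 0 ≤ l.getD b 0 ∧
      ∀ j, b < j → j < a → l.getD j 0 < l.getD a 0) st →
    (∀ c ∈ st.getLast?, ∀ j < c, l.getD j 0 < l.getD c 0) →
    sc.length = l.length →
    (∀ a ∈ st, a < l.length) →
    (∀ j, j < l.length → j ∉ st → sc.getD j 0 = pvB l j) →
    (pvDrain l st sc).length = l.length ∧
    (∀ j, j < l.length → (pvDrain l st sc).getD j 0 = pvB l j) := by
  intro st
  induction st with
  | nil =>
    intro sc _ _ _ len _ scores
    exact ⟨len, fun j hj => scores j hj (by simp)⟩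
  | cons top rest ih =>
    intro sc pw link bot len bound scores
    have hb' : ∀ b ∈ rest.head?, b < top ∧ l.getD top 0 ≤ l.getD b 0 ∧
        ∀ j, b < j → j < top → l.getD j 0 < l.getD top 0 := by
      intro b hb
      have hmem := List.mem_of_mem_head? hb
      have hlnk := (List.isChain_cons.mp link).1 b hb
      exact ⟨List.rel_of_pairwise_cons pw hmem, hlnk.1, hlnk.2⟩
    have hx := pv_wv_eq l top rest hb'
      (by intro hr j hj; subst hr; exact bot top (by simp) j hj)
    have hbot' : ∀ c ∈ rest.getLast?, ∀ j < c, l.getD j 0 < l.getD c 0 := by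
      cases rest with
      | nil => simp
      | cons r t =>
        intro c hc
        exact bot c (by rw [List.getLast?_cons_cons]; exact hc)
    have htopnr : top ∉ rest := by
      intro hm
      exact absurd (List.rel_of_pairwise_cons pw hm) (lt_irrefl top)
    have htoplen : top < l.length := bound top List.mem_cons_self
    refine ih (sc.set top (pvWV l top rest)) (List.pairwise_cons.mp pw).2
      (List.isChain_cons.mp link).2 hbot' (by simpa using len)
      (fun a ha => bound a (List.mem_cons_of_mem _ ha)) ?_
    intro j hj hjr
    by_cases hjt : j = top
    · subst hjt
      rw [pv_getD_set_self _ _ _ (by rw [len]; exact htoplen)]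
      exact hx
    · rw [pv_getD_set_ne _ _ _ _ (Ne.symm hjt)]
      refine scores j hj ?_
      simp only [List.mem_cons, not_or]
      exact ⟨hjt, hjr⟩

lemma pv_sum_eq (f : Nat → Int) :
    ∀ (sc : List Int) (n : Nat), sc.length = n → (∀ j, j < n → sc.getD j 0 = f j) →
    sc.sum = (List.range n).foldl (fun a i => a + f i) 0 := by
  intro sc n hlen hval
  have hsc : sc = (List.range n).map f := by
    apply List.ext_getElem
    · simp [hlen]
    · intro j h1 h2
      have hj : j < n := by simpa using h2
      have := hval j hj
      rw [List.getD_eq_getElem _ _ h1] at this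
      simp [this]
  rw [hsc, ← List.foldl_map]
  exact List.sum_eq_foldl

-- ===== VERDICT (by name: the statement is the Claim_ definition above) =====
theorem findGroupID_spec : Claim_equal_findGroupID := by
  intro l _
  unfold Spec_findGroupID
  have inv := pv_fold_inv l l.length le_rfl
  obtain ⟨hlen, hval⟩ := pv_drain_spec l _ _ inv.pw inv.link inv.bot inv.len
    (fun a ha => inv.bound a ha) (fun j hj hjs => inv.scores j hj hjs)
  show (pvDrain l _ _).sum = _
  rw [pv_sum_eq (pvB l) _ l.length hlen hval]
  rfl
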